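-- pv_equiv track=rewrite | github.com/myaji35/30_OmniVibePor | backend/scripts/lint_ffmpeg_profile_usage.py | _is_short_probe
-- ===== SOURCE A (Python) =====
-- SHORT_PROBE_PATTERNS = {
--     ("-version",),
--     ("-hide_banner", "-encoders"),
--     ("-hide_banner", "-version"),
--     ("-encoders",),
--     ("-codecs",),
--     ("-formats",),
--     ("-buildconf",),
-- }
--
-- def _is_short_probe(cmd_strs: list) -> bool:
--     """
--     capability check / probe 같은 짧은 cmd인지.
--     cmd_strs[0] == "ffmpeg" 가정.
--     """
--     if len(cmd_strs) > 6:
--         return False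
--     tail = tuple(cmd_strs[1:])
--     # 화이트리스트 패턴 매칭 (앞부분 일치)
--     for pattern in SHORT_PROBE_PATTERNS:
--         if tail[: len(pattern)] == pattern:
--             return True
--     return False
-- ===== SOURCE B (Python) =====
-- # Early-return chain with direct positional checks instead of looping over the pattern set.
-- _SINGLE_FLAGS = {"-version", "-encoders", "-codecs", "-formats", "-buildconf"}
-- _HIDE_BANNER_SECONDS = {"-version", "-encoders"}
--
-- def _is_short_probe(cmd_strs: list) -> bool:
--     if not 2 <= len(cmd_strs) <= 6:
--         return False
--     first = cmd_strs[1]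
--     if first in _SINGLE_FLAGS:
--         return True
--     return first == "-hide_banner" and len(cmd_strs) >= 3 and cmd_strs[2] in _HIDE_BANNER_SECONDS
-- ===== Notes on version B (the rewrite author's own statement) =====
-- stated objective: simpler
-- what changed: Replaced the loop over seven pattern tuples with slice comparisons by a direct early-return chain: check cmd_strs[1] against the five single-flag probes, else the -hide_banner/second-flag pair.
import Mathlib
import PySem

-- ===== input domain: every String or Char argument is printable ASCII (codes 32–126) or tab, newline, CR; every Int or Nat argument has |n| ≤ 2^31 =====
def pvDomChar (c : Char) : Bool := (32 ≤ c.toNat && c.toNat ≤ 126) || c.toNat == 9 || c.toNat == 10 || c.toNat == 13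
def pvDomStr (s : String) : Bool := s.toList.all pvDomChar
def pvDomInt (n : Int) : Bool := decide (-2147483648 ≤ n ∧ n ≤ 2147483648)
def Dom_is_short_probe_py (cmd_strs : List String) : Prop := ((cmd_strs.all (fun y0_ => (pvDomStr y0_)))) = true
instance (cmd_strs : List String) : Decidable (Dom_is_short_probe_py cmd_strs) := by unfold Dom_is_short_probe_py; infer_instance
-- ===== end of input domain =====

-- B replaces A's loop over seven pattern tuples by a direct early-return chain on cmd_strs[1] / cmd_strs[2] (objective: simpler).

-- ===== PORT A =====
-- SHORT_PROBE_PATTERNS, in source order (result is a disjunction, so set iteration order is immaterial)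
def shortProbePatterns : List (List String) :=
  [["-version"],
   ["-hide_banner", "-encoders"],
   ["-hide_banner", "-version"],
   ["-encoders"],
   ["-codecs"],
   ["-formats"],
   ["-buildconf"]]

def is_short_probe_py (cmd_strs : List String) : Bool :=
  if cmd_strs.length > 6 then false
  else
    -- tail = tuple(cmd_strs[1:]); cmd_strs[1:] is List.drop 1 (nonnegative slice from 1)
    let tail := cmd_strs.drop 1
    -- for pattern in …: if tail[:len(pattern)] == pattern: return True / return False
    shortProbePatterns.any (fun pattern => tail.take pattern.length == pattern)

-- ===== PORT B =====
def singleFlags : List String := ["-version", "-encoders", "-codecs", "-formats", "-buildconf"]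
def hideBannerSeconds : List String := ["-version", "-encoders"]

def is_short_probe_py_alt (cmd_strs : List String) : Bool :=
  if !(2 ≤ cmd_strs.length && cmd_strs.length ≤ 6) then false
  else
    match cmd_strs with
    | _ :: first :: rest =>
        if singleFlags.contains first then true
        else
          first == "-hide_banner" && decide (3 ≤ cmd_strs.length) &&
            (match rest with
             | second :: _ => hideBannerSeconds.contains second
             | [] => false)
    | _ => false

-- ===== PRECONDITION & SPEC =====
def Spec_is_short_probe_py (cmd_strs : List String) (out : Bool) : Prop := out = is_short_probe_py_alt cmd_strs
instance (cmd_strs : List String) (out : Bool) : Decidable (Spec_is_short_probe_py cmd_strs out) := by unfold Spec_is_short_probe_py; infer_instance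

-- ===== CLAIM (what is proved, stated in full; the proofs are below) =====
def Claim_equal_is_short_probe_py : Prop := ∀ (cmd_strs : List String), Dom_is_short_probe_py cmd_strs → Spec_is_short_probe_py cmd_strs (is_short_probe_py cmd_strs)

-- ===== LEMMAS AND PROOFS =====

-- ===== VERDICT (by name: the statement is the Claim_ definition above) =====
theorem is_short_probe_py_spec : Claim_equal_is_short_probe_py := by
  intro cmd _
  unfold Spec_is_short_probe_py
  match cmd with
  | [] => decide
  | [_] => simp [is_short_probe_py, is_short_probe_py_alt, shortProbePatterns]
  | a :: b :: u =>
    cases u with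
    | nil =>
      simp [is_short_probe_py, is_short_probe_py_alt, shortProbePatterns, singleFlags]
      tauto
    | cons c v =>
      simp [is_short_probe_py, is_short_probe_py_alt, shortProbePatterns, singleFlags,
            hideBannerSeconds]
      by_cases h4 : 4 ≤ v.length
      · simp [h4]
      · simp [h4]
        rw [Bool.eq_iff_iff]
        simp only [Bool.or_eq_true, Bool.and_eq_true, beq_iff_eq, decide_eq_true_eq]
        tauto
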